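-- pv_equiv track=rewrite | github.com/gtins/leilao-entregas | app.py | leilao_otimizado
-- ===== SOURCE A (Python) =====
-- def leilao_otimizado(conexoes, entregas):
--     n = len(entregas)
--     dp = [0] * (n + 1)
--
--     for i in range(1, n + 1):
--         horario, destino, bonus = entregas[i - 1]
--         if destino in conexoes['A']:
--             dp[i] = max(dp[i - 1], dp[i - 1] + bonus)
--         else:
--             dp[i] = dp[i - 1]
--
--     sequencia_entregas = []
--     lucro_total = dp[n]
--     for i in range(n, 0, -1):
--         if dp[i] != dp[i - 1]:
--             sequencia_entregas.append(entregas[i - 1])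
--
--     sequencia_entregas.reverse()
--     return sequencia_entregas, lucro_total
-- ===== SOURCE B (Python) =====
-- def leilao_otimizado(conexoes, entregas):
--     # Single forward pass: a delivery is selected iff its destination is
--     # directly reachable from 'A' and its bonus is positive.
--     sequencia_entregas = []
--     lucro_total = 0
--     for entrega in entregas:
--         _, destino, bonus = entrega
--         if destino in conexoes['A'] and bonus > 0:
--             sequencia_entregas.append(entrega)
--             lucro_total += bonus
--     return sequencia_entregas, lucro_total
-- ===== Notes on version B (the rewrite author's own statement) =====
-- stated objective: simpler
-- what changed: Replaced A's dp array plus backward reconstruction (two loops and a reverse) with a single forward loop that appends a delivery exactly when its destination is in conexoes['A'] and its bonus is positive, accumulating the total as it goes.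
import Mathlib
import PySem

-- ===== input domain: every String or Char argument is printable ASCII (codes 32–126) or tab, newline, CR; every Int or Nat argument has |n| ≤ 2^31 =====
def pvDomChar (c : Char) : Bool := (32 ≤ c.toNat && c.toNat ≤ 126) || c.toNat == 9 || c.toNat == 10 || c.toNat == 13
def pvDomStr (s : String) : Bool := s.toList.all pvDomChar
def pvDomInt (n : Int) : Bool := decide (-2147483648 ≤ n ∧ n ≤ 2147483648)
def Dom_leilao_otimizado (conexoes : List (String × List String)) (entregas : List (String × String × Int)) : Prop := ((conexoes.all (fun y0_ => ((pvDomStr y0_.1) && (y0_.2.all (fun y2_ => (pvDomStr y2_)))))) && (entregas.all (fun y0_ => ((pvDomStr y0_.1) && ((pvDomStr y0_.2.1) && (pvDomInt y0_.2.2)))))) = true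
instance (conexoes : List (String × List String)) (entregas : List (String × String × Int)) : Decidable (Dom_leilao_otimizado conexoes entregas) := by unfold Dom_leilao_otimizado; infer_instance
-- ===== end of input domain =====

-- B replaces A's dp array and backward reconstruction with one forward pass that selects a
-- delivery iff its destination is reachable from 'A' and its bonus is positive (objective: simpler).

-- ===== PORT A =====
-- the forward dp loop of A: produces [dp[1], …, dp[n]] given dp[0] = prev
def pvDpA (adj : List String) : List (String × String × Int) → Int → List Int
  | [], _ => []
  | (_, destino, bonus) :: rest, prev =>
      let cur := if adj.contains destino then max prev (prev + bonus) else prev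
      cur :: pvDpA adj rest cur

def leilao_otimizado (conexoes : List (String × List String)) (entregas : List (String × String × Int)) : (List (String × String × Int)) × Int :=
  let n : Int := entregas.length
  -- conexoes['A'] (total via getD []; Pre_ guarantees the key exists whenever it is looked up)
  let dp : List Int := 0 :: pvDpA (((PySem.Dict.mk conexoes).get? "A").getD []) entregas 0
  let seq := (PySem.List.pyRange n 0 (-1)).foldl (fun acc i =>
      if PySem.List.pyGetD dp i 0 ≠ PySem.List.pyGetD dp (i - 1) 0
      then acc ++ [PySem.List.pyGetD entregas (i - 1) ("", "", 0)]
      else acc) []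
  (seq.reverse, PySem.List.pyGetD dp n 0)

-- ===== PORT B =====
def leilao_otimizado_alt (conexoes : List (String × List String)) (entregas : List (String × String × Int)) : (List (String × String × Int)) × Int :=
  entregas.foldl (fun acc e =>
      if (((PySem.Dict.mk conexoes).get? "A").getD []).contains e.2.1 && decide (e.2.2 > 0)
      then (acc.1 ++ [e], acc.2 + e.2.2)
      else acc) (([] : List (String × String × Int)), (0 : Int))

-- ===== PRECONDITION & SPEC =====
-- Pre_ excludes exactly the inputs on which the Python A raises KeyError: entregas nonempty while conexoes has no key 'A'.
def Pre_leilao_otimizado (conexoes : List (String × List String)) (entregas : List (String × String × Int)) : Prop :=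
  entregas = [] ∨ (PySem.Dict.mk conexoes).contains "A" = true
instance (conexoes : List (String × List String)) (entregas : List (String × String × Int)) : Decidable (Pre_leilao_otimizado conexoes entregas) := by unfold Pre_leilao_otimizado; infer_instance
def pvWitness_leilao_otimizado : (List (String × List String)) × (List (String × String × Int)) :=
  ([("A", ["B", "C"])], [("08", "B", 5), ("09", "D", 3), ("10", "C", -2)])
def Spec_leilao_otimizado (conexoes : List (String × List String)) (entregas : List (String × String × Int)) (out : (List (String × String × Int)) × Int) : Prop := out = leilao_otimizado_alt conexoes entregas
instance (conexoes : List (String × List String)) (entregas : List (String × String × Int)) (out : (List (String × String × Int)) × Int) : Decidable (Spec_leilao_otimizado conexoes entregas out) := by unfold Spec_leilao_otimizado; infer_instance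

-- ===== CLAIM (what is proved, stated in full; the proofs are below) =====
def Claim_equal_leilao_otimizado : Prop := ∀ (conexoes : List (String × List String)) (entregas : List (String × String × Int)), Dom_leilao_otimizado conexoes entregas → Pre_leilao_otimizado conexoes entregas → Spec_leilao_otimizado conexoes entregas (leilao_otimizado conexoes entregas)

-- ===== LEMMAS AND PROOFS =====

-- the per-delivery dp increment
def pvC (adj : List String) (e : String × String × Int) : Int :=
  if adj.contains e.2.1 then max 0 e.2.2 else 0

-- the selection test of B
def pvQ (adj : List String) (e : String × String × Int) : Bool :=
  adj.contains e.2.1 && decide (e.2.2 > 0)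

-- A's dp value at index k = sum of the increments of the first k deliveries
def pvF (adj : List String) (es : List (String × String × Int)) (k : Nat) : Int :=
  ((es.take k).map (pvC adj)).sum

theorem pvDpA_eq_map (adj : List String) (es : List (String × String × Int)) :
    ∀ prev : Int, pvDpA adj es prev = (List.range es.length).map (fun k => prev + pvF adj es (k + 1)) := by
  induction es with
  | nil => intro prev; simp [pvDpA]
  | cons e t ih =>
    intro prev
    obtain ⟨h, dst, b⟩ := e
    have hcur : (if adj.contains dst then max prev (prev + b) else prev) = prev + pvC adj (h, dst, b) := by
      unfold pvC
      split
      · rcases le_total 0 b with hb | hb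
        · rw [max_eq_right (by omega : prev ≤ prev + b), max_eq_right hb]
        · rw [max_eq_left (by omega : prev + b ≤ prev), max_eq_left hb, add_zero]
      · rw [add_zero]
    simp only [pvDpA]
    rw [hcur, ih]
    rw [List.length_cons, List.range_succ_eq_map, List.map_cons, List.map_map]
    congr 1
    · simp [pvF]
    · apply List.map_congr_left
      intro k _
      simp only [Function.comp, Nat.succ_eq_add_one, pvF, List.take_succ_cons, List.map_cons, List.sum_cons]
      ring

theorem pvDp_getD (adj : List String) (es : List (String × String × Int)) (k : Nat) (hk : k ≤ es.length) :
    (0 :: pvDpA adj es 0).getD k 0 = pvF adj es k := by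
  cases k with
  | zero => simp [pvF]
  | succ k =>
    have hk' : k < es.length := by omega
    rw [pvDpA_eq_map]
    simpa using PySem.List.getD_map_range (fun k => (0:Int) + pvF adj es (k + 1)) es.length k 0 hk'

theorem pvF_succ (adj : List String) (es : List (String × String × Int)) (k : Nat) (hk : k < es.length) :
    pvF adj es (k + 1) = pvF adj es k + pvC adj es[k] := by
  have h1 : es.take (k + 1) = es.take k ++ [es[k]] := by
    rw [List.take_succ]
    simp [List.getElem?_eq_getElem hk]
  unfold pvF
  rw [h1, List.map_append, List.sum_append, List.map_cons, List.map_nil, List.sum_cons, List.sum_nil, add_zero]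

theorem pvC_ne_zero (adj : List String) (e : String × String × Int) :
    (pvC adj e ≠ 0) ↔ pvQ adj e = true := by
  unfold pvC pvQ
  by_cases hc : adj.contains e.2.1 = true <;> simp [hc] <;> omega

-- the generic "filter the indices, then read back" identity flattening A's reconstruction
theorem pvFilterRangeMap {α : Type} (q : α → Bool) (d : α) (es : List α) :
    (((List.range es.length).filter (fun k => q (es.getD k d))).map (fun k => es.getD k d)) = es.filter q := by
  induction es with
  | nil => simp
  | cons e t ih =>
    have h1 : List.filter (fun k => q ((e :: t).getD k d)) (List.map Nat.succ (List.range t.length))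
        = List.map Nat.succ (List.filter (fun k => q (t.getD k d)) (List.range t.length)) := by
      rw [List.filter_map]
      apply congrArg
      apply List.filter_congr
      intro k _
      rfl
    have h2 : ∀ l : List Nat, List.map (fun k => (e :: t).getD k d) (List.map Nat.succ l)
        = List.map (fun k => t.getD k d) l := by
      intro l
      rw [List.map_map]
      apply List.map_congr_left
      intro k _
      rfl
    rw [List.length_cons, List.range_succ_eq_map, List.filter_cons, List.getD_cons_zero, List.filter_cons]
    by_cases hq : q e = true
    · rw [if_pos hq, if_pos hq, List.map_cons, List.getD_cons_zero, h1, h2, ih]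
    · rw [if_neg hq, if_neg hq, h1, h2, ih]

-- B's fold as an explicit filter + sum
theorem pvBfold (adj : List String) (es : List (String × String × Int)) :
    ∀ (acc : List (String × String × Int) × Int),
      es.foldl (fun acc e => if adj.contains e.2.1 && decide (e.2.2 > 0) then (acc.1 ++ [e], acc.2 + e.2.2) else acc) acc
        = (acc.1 ++ es.filter (pvQ adj), acc.2 + ((es.filter (pvQ adj)).map (fun e => e.2.2)).sum) := by
  induction es with
  | nil => intro acc; simp
  | cons e t ih =>
    intro acc
    simp only [List.foldl_cons, List.filter_cons]
    by_cases hq : pvQ adj e = true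
    · rw [if_pos (by simpa [pvQ] using hq), if_pos hq, ih]
      simp [add_assoc]
    · rw [if_neg (by simpa [pvQ] using hq), if_neg hq, ih]

theorem pvSumC_eq (adj : List String) (es : List (String × String × Int)) :
    (es.map (pvC adj)).sum = ((es.filter (pvQ adj)).map (fun e => e.2.2)).sum := by
  induction es with
  | nil => simp
  | cons e t ih =>
    simp only [List.map_cons, List.sum_cons, List.filter_cons]
    by_cases hq : pvQ adj e = true
    · have hc : pvC adj e = e.2.2 := by
        unfold pvQ at hq
        unfold pvC
        simp only [Bool.and_eq_true, decide_eq_true_eq] at hq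
        rw [if_pos hq.1]
        omega
      rw [if_pos hq]
      simp [hc, ih]
    · have hc : pvC adj e = 0 := by
        by_contra hne
        exact hq ((pvC_ne_zero adj e).mp hne)
      rw [if_neg hq]
      simp [hc, ih]

-- ===== VERDICT (by name: the statement is the Claim_ definition above) =====
theorem leilao_otimizado_spec : Claim_equal_leilao_otimizado := by
  intro cx es _ _
  unfold Spec_leilao_otimizado leilao_otimizado leilao_otimizado_alt
  dsimp only
  rw [pvBfold (((PySem.Dict.mk cx).get? "A").getD []) es ([], 0)]
  simp only [List.nil_append, zero_add]
  set adj := (((PySem.Dict.mk cx).get? "A").getD []) with hadj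
  set dp : List Int := 0 :: pvDpA adj es 0 with hdp
  set d0 : String × String × Int := ("", "", 0) with hd0
  rw [PySem.List.foldl_append_ite (fun i => PySem.List.pyGetD dp i 0 ≠ PySem.List.pyGetD dp (i - 1) 0)
        (fun i => PySem.List.pyGetD es (i - 1) d0)]
  simp only [List.nil_append]
  rw [← List.map_reverse, ← List.filter_reverse, PySem.List.pyRange_neg_one_eq_reverse, List.reverse_reverse]
  rw [PySem.List.pyRange_one]
  have hn : (((es.length : Int)) + 1 - (0 + 1)).toNat = es.length := by omega
  rw [hn, List.filter_map, List.map_map]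
  have key : ∀ k ∈ List.range es.length,
      ((fun i => decide (PySem.List.pyGetD dp i 0 ≠ PySem.List.pyGetD dp (i - 1) 0)) ∘ (fun k : Nat => (0 : Int) + 1 + (k : Int))) k
        = pvQ adj (es.getD k d0) := by
    intro k hk
    rw [List.mem_range] at hk
    have e1 : (0 : Int) + 1 + (k : Int) = ((k + 1 : Nat) : Int) := by push_cast; ring
    have e2 : ((k + 1 : Nat) : Int) - 1 = ((k : Nat) : Int) := by push_cast; ring
    simp only [Function.comp, e1, e2, PySem.List.pyGetD_natCast]
    rw [hdp, pvDp_getD adj es (k + 1) (by omega), pvDp_getD adj es k (by omega), pvF_succ adj es k hk]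
    have e3 : es.getD k d0 = es[k] := List.getD_eq_getElem es d0 hk
    rw [e3]
    by_cases hc : pvQ adj es[k] = true
    · have hne : pvC adj es[k] ≠ 0 := (pvC_ne_zero _ _).mpr hc
      simp only [hc, decide_eq_true_eq]
      omega
    · have h0 : pvC adj es[k] = 0 := by
        by_contra hne
        exact hc ((pvC_ne_zero _ _).mp hne)
      simp [h0, hc]
  rw [List.filter_congr key]
  have keymap : ((fun i => PySem.List.pyGetD es (i - 1) d0) ∘ (fun k : Nat => (0 : Int) + 1 + (k : Int)))
      = (fun k : Nat => es.getD k d0) := by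
    funext k
    have e2 : (0 : Int) + 1 + (k : Int) - 1 = ((k : Nat) : Int) := by push_cast; ring
    simp only [Function.comp, e2, PySem.List.pyGetD_natCast]
  rw [keymap, pvFilterRangeMap (pvQ adj) d0 es]
  have hsum : PySem.List.pyGetD dp (es.length : Int) 0 = ((es.filter (pvQ adj)).map (fun e => e.2.2)).sum := by
    rw [PySem.List.pyGetD_natCast, hdp, pvDp_getD adj es es.length le_rfl]
    unfold pvF
    rw [List.take_length, pvSumC_eq]
  rw [hsum]
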